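-- pv_equiv track=rewrite | github.com/utcoalition/utcctf-19 | misc-dilbert/lindenmayer.py | l2coords
-- ===== SOURCE A (Python) =====
-- def l2coords(string):
--     coords = [(0, 0)]
--     heading = 0
--     for c in string:
--         if c == "F":
--             prev = coords[-1]
--             if heading == 0:
--                 coords.append((prev[0] + 1, prev[1]))
--             elif heading == 1:
--                 coords.append((prev[0], prev[1] + 1))
--             elif heading == 2:
--                 coords.append((prev[0] - 1, prev[1]))
--             elif heading == 3:
--                 coords.append((prev[0], prev[1] - 1))
--         if c == "+":
--             heading += 1
--             heading %= 4
--         if c == "-":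
--             heading -= 1
--             heading %= 4
--     return coords
-- ===== SOURCE B (Python) =====
-- def l2coords(string):
--     # pass 1: record the cumulative turn count at each forward step
--     headings = []
--     t = 0
--     for c in string:
--         if c == "F":
--             headings.append(t)
--         elif c == "+":
--             t += 1
--         elif c == "-":
--             t -= 1
--     # pass 2: prefix-sum the unit steps given by each heading mod 4
--     table = [(1, 0), (0, 1), (-1, 0), (0, -1)]
--     x, y = 0, 0
--     coords = [(0, 0)]
--     for h in headings:
--         dx, dy = table[h % 4]
--         x, y = x + dx, y + dy
--         coords.append((x, y))
--     return coords
-- ===== Notes on version B (the rewrite author's own statement) =====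
-- stated objective: alternative
-- what changed: B works in two staged passes instead of A's single interleaved walk: pass 1 reduces the string to the list of cumulative turn counts at each 'F', pass 2 prefix-sums the unit steps obtained by a table lookup on that count mod 4; no heading state or branch table is carried while building coordinates.
import Mathlib
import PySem

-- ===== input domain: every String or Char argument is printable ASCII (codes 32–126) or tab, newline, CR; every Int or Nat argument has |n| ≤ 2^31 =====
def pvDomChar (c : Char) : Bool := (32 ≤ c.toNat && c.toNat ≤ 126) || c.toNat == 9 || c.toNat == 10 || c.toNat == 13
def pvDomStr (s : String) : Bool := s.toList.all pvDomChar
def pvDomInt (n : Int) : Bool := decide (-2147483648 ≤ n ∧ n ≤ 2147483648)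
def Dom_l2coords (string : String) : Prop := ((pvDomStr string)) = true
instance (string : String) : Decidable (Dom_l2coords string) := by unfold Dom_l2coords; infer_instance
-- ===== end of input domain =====

-- B replaces A's single interleaved walk (heading state + four-way branch) by two staged passes:
-- collect the cumulative turn count at each 'F', then prefix-sum the table-looked-up unit steps.

-- ===== PORT A =====
-- loop body of A: state = (coords, heading); coords[-1] on the always-nonempty coords is List.getLastD
def stepA (st : List (Int × Int) × Int) (c : Char) : List (Int × Int) × Int :=
  let coords := st.1
  let heading := st.2
  let coords :=
    if c = 'F' then
      let prev := coords.getLastD (0, 0)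
      if heading = 0 then coords ++ [(prev.1 + 1, prev.2)]
      else if heading = 1 then coords ++ [(prev.1, prev.2 + 1)]
      else if heading = 2 then coords ++ [(prev.1 - 1, prev.2)]
      else if heading = 3 then coords ++ [(prev.1, prev.2 - 1)]
      else coords
    else coords
  let heading := if c = '+' then PySem.Int.mod (heading + 1) 4 else heading
  let heading := if c = '-' then PySem.Int.mod (heading - 1) 4 else heading
  (coords, heading)

def l2coords (string : String) : List (Int × Int) :=
  (string.toList.foldl stepA ([(0, 0)], 0)).1

-- ===== PORT B =====
-- pass 1 loop body: state = (headings, t)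
def step1B (st : List Int × Int) (c : Char) : List Int × Int :=
  if c = 'F' then (st.1 ++ [st.2], st.2)
  else if c = '+' then (st.1, st.2 + 1)
  else if c = '-' then (st.1, st.2 - 1)
  else st

def tableB : List (Int × Int) := [(1, 0), (0, 1), (-1, 0), (0, -1)]

-- pass 2 loop body: state = (coords, x, y); table[h % 4] is always in range (0 ≤ h%4 < 4), so getD's default is unreachable
def step2B (st : List (Int × Int) × Int × Int) (h : Int) : List (Int × Int) × Int × Int :=
  let d := (PySem.List.pyGet? tableB (PySem.Int.mod h 4)).getD (0, 0)
  (st.1 ++ [(st.2.1 + d.1, st.2.2 + d.2)], st.2.1 + d.1, st.2.2 + d.2)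

def l2coords_alt (string : String) : List (Int × Int) :=
  let headings := (string.toList.foldl step1B ([], 0)).1
  (headings.foldl step2B ([(0, 0)], 0, 0)).1

-- ===== PRECONDITION & SPEC =====
def Spec_l2coords (string : String) (out : List (Int × Int)) : Prop := out = l2coords_alt string
instance (string : String) (out : List (Int × Int)) : Decidable (Spec_l2coords string out) := by unfold Spec_l2coords; infer_instance

-- ===== CLAIM (what is proved, stated in full; the proofs are below) =====
def Claim_equal_l2coords : Prop := ∀ (string : String), Dom_l2coords string → Spec_l2coords string (l2coords string)

-- ===== LEMMAS AND PROOFS =====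
-- recursive form of pass 1 (the list of cumulative turn counts at each 'F')
def pass1 : List Char → Int → List Int
  | [], _ => []
  | c :: cs, t =>
    if c = 'F' then t :: pass1 cs t
    else if c = '+' then pass1 cs (t + 1)
    else if c = '-' then pass1 cs (t - 1)
    else pass1 cs t

lemma pass1_foldl (cs : List Char) (acc : List Int) (t : Int) :
    (cs.foldl step1B (acc, t)).1 = acc ++ pass1 cs t := by
  induction cs generalizing acc t with
  | nil => simp [pass1]
  | cons c cs ih =>
    by_cases hF : c = 'F' <;> by_cases hP : c = '+' <;> by_cases hM : c = '-' <;>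
      simp_all [pass1, step1B]

lemma mod4_cases (t : Int) :
    PySem.Int.mod t 4 = 0 ∨ PySem.Int.mod t 4 = 1 ∨
    PySem.Int.mod t 4 = 2 ∨ PySem.Int.mod t 4 = 3 := by
  simp [PySem.Int.mod, Int.fmod_eq_emod]
  omega

-- one 'F' step: A appends the same point that pass 2's table step appends, and it becomes the last point
lemma stepF_sim (coords : List (Int × Int)) (x y t : Int)
    (hlast : coords.getLastD (0, 0) = (x, y)) :
    ∃ c' x' y',
      stepA (coords, PySem.Int.mod t 4) 'F' = (c', PySem.Int.mod t 4) ∧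
      step2B (coords, x, y) t = (c', x', y') ∧
      c'.getLastD (0, 0) = (x', y') := by
  rcases mod4_cases t with h | h | h | h
  · refine ⟨coords ++ [(x + 1, y)], x + 1, y, ?_, ?_, by simp⟩
    · simp only [stepA]; rw [h]; simp [-List.getLastD_eq_getLast?, hlast]
    · simp only [step2B]; rw [h]; norm_num [tableB, PySem.List.pyGet?, PySem.List.pyIdx?]
  · refine ⟨coords ++ [(x, y + 1)], x, y + 1, ?_, ?_, by simp⟩
    · simp only [stepA]; rw [h]; simp [-List.getLastD_eq_getLast?, hlast]
    · simp only [step2B]; rw [h]; norm_num [tableB, PySem.List.pyGet?, PySem.List.pyIdx?]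
  · refine ⟨coords ++ [(x - 1, y)], x - 1, y, ?_, ?_, by simp⟩
    · simp only [stepA]; rw [h]; simp [-List.getLastD_eq_getLast?, hlast]
    · simp only [step2B]; rw [h]; norm_num [tableB, PySem.List.pyGet?, PySem.List.pyIdx?]
      simp [sub_eq_add_neg]
  · refine ⟨coords ++ [(x, y - 1)], x, y - 1, ?_, ?_, by simp⟩
    · simp only [stepA]; rw [h]; simp [-List.getLastD_eq_getLast?, hlast]
    · simp only [step2B]; rw [h]; norm_num [tableB, PySem.List.pyGet?, PySem.List.pyIdx?]
      simp [sub_eq_add_neg]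

-- main simulation: A's interleaved fold from heading t%4 equals pass 2 over pass1's heading list,
-- provided (x, y) is the last coordinate so far
lemma sim (cs : List Char) (coords : List (Int × Int)) (x y t : Int)
    (hlast : coords.getLastD (0, 0) = (x, y)) :
    (cs.foldl stepA (coords, PySem.Int.mod t 4)).1 =
      ((pass1 cs t).foldl step2B (coords, x, y)).1 := by
  induction cs generalizing coords x y t with
  | nil => simp [pass1]
  | cons c cs ih =>
    by_cases hF : c = 'F'
    · subst hF
      rw [List.foldl_cons, show pass1 ('F' :: cs) t = t :: pass1 cs t from rfl,
        List.foldl_cons]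
      obtain ⟨c', x', y', hA, hB, hl⟩ := stepF_sim coords x y t hlast
      rw [hA, hB]
      exact ih c' x' y' t hl
    · by_cases hP : c = '+'
      · subst hP
        rw [List.foldl_cons, show pass1 ('+' :: cs) t = pass1 cs (t + 1) from rfl]
        have : stepA (coords, PySem.Int.mod t 4) '+' = (coords, PySem.Int.mod (t + 1) 4) := by
          simp [stepA]
        rw [this]; exact ih coords x y (t + 1) hlast
      · by_cases hM : c = '-'
        · subst hM
          rw [List.foldl_cons, show pass1 ('-' :: cs) t = pass1 cs (t - 1) from rfl]
          have : stepA (coords, PySem.Int.mod t 4) '-' = (coords, PySem.Int.mod (t - 1) 4) := by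
            simp [stepA]
          rw [this]; exact ih coords x y (t - 1) hlast
        · rw [List.foldl_cons, show pass1 (c :: cs) t = pass1 cs t from by
            simp [pass1, hF, hP, hM]]
          have : stepA (coords, PySem.Int.mod t 4) c = (coords, PySem.Int.mod t 4) := by
            simp [stepA, hF, hP, hM]
          rw [this]; exact ih coords x y t hlast

-- ===== VERDICT (by name: the statement is the Claim_ definition above) =====
theorem l2coords_spec : Claim_equal_l2coords := by
  intro s _
  unfold Spec_l2coords l2coords l2coords_alt
  rw [pass1_foldl s.toList [] 0, List.nil_append,
    show (0 : Int) = PySem.Int.mod 0 4 from rfl]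
  exact sim s.toList [(0, 0)] 0 0 0 rfl
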